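-- pv_equiv track=rewrite | github.com/ronnix/jeux-de-programmation | 04-advent-of-code-2019/day01.py | required_fuel_taking_fuel_mass_into_account
-- ===== SOURCE A (Python) =====
-- def required_fuel(mass):
--     return max(0, mass // 3 - 2)
--
-- def required_fuel_taking_fuel_mass_into_account(mass):
--     extra_mass = []
--     while True:
--         mass = required_fuel(mass)
--         if mass == 0:
--             break
--         extra_mass.append(mass)
--     return sum(extra_mass)
-- ===== SOURCE B (Python) =====
-- def required_fuel(mass):
--     return max(0, mass // 3 - 2)
--
-- def required_fuel_taking_fuel_mass_into_account(mass):
--     f = required_fuel(mass)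
--     return 0 if f == 0 else f + required_fuel_taking_fuel_mass_into_account(f)
-- ===== Notes on version B (the rewrite author's own statement) =====
-- stated objective: simpler
-- what changed: Replaced the while-loop that appends each successive fuel amount to a list and then sums it with a direct recursion that accumulates the total through return values, with no intermediate list.
import Mathlib
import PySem

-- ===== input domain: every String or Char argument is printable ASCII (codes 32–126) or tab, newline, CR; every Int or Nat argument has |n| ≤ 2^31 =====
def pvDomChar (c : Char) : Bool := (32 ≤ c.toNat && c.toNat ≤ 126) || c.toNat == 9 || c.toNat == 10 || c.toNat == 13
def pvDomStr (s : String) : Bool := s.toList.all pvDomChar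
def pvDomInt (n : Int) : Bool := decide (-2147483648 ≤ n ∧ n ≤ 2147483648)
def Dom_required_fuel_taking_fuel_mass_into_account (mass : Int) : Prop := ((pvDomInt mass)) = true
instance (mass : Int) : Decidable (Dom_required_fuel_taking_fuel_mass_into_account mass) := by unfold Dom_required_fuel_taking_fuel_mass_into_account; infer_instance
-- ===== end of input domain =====

-- B replaces A's while-loop that collects each fuel amount in a list and sums it
-- with a direct recursion accumulating the total through return values (objective: simpler).

-- ===== PORT A =====
def required_fuel (mass : Int) : Int := max 0 (PySem.Int.floordiv mass 3 - 2)

theorem required_fuel_dec (m : Int) (h : ¬ required_fuel m = 0) :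
    (required_fuel m).toNat < m.toNat := by
  unfold required_fuel at *
  rw [PySem.Int.floordiv_eq_ediv_of_pos (by norm_num)] at *
  omega

-- the while-True loop: mutate mass, break on 0, else append to extra_mass
def pvFuelLoopA (mass : Int) (extra_mass : List Int) : List Int :=
  let m := required_fuel mass
  if h : m = 0 then extra_mass
  else pvFuelLoopA m (extra_mass ++ [m])
termination_by mass.toNat
decreasing_by exact required_fuel_dec _ h

def required_fuel_taking_fuel_mass_into_account (mass : Int) : Int :=
  (pvFuelLoopA mass []).sum

-- ===== PORT B =====
def required_fuel_taking_fuel_mass_into_account_alt (mass : Int) : Int :=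
  let f := required_fuel mass
  if h : f = 0 then 0
  else f + required_fuel_taking_fuel_mass_into_account_alt f
termination_by mass.toNat
decreasing_by exact required_fuel_dec _ h

-- ===== PRECONDITION & SPEC =====
def Spec_required_fuel_taking_fuel_mass_into_account (mass : Int) (out : Int) : Prop := out = required_fuel_taking_fuel_mass_into_account_alt mass
instance (mass : Int) (out : Int) : Decidable (Spec_required_fuel_taking_fuel_mass_into_account mass out) := by unfold Spec_required_fuel_taking_fuel_mass_into_account; infer_instance

-- ===== CLAIM (what is proved, stated in full; the proofs are below) =====
def Claim_equal_required_fuel_taking_fuel_mass_into_account : Prop := ∀ (mass : Int), Dom_required_fuel_taking_fuel_mass_into_account mass → Spec_required_fuel_taking_fuel_mass_into_account mass (required_fuel_taking_fuel_mass_into_account mass)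

-- ===== LEMMAS AND PROOFS =====
theorem pvFuelLoopA_sum (mass : Int) (extra_mass : List Int) :
    (pvFuelLoopA mass extra_mass).sum
      = extra_mass.sum + required_fuel_taking_fuel_mass_into_account_alt mass := by
  fun_induction pvFuelLoopA mass extra_mass with
  | case1 m ex f h =>
      rw [required_fuel_taking_fuel_mass_into_account_alt]
      split_ifs with h2
      · simp
      · exact absurd h h2
  | case2 m ex f h ih =>
      rw [required_fuel_taking_fuel_mass_into_account_alt]
      rw [ih]
      simp only [List.sum_append, List.sum_cons, List.sum_nil, List.sum_nil]
      split_ifs with h2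
      · exact absurd h2 h
      · ring

-- ===== VERDICT (by name: the statement is the Claim_ definition above) =====
theorem required_fuel_taking_fuel_mass_into_account_spec : Claim_equal_required_fuel_taking_fuel_mass_into_account := by
  intro mass _
  unfold Spec_required_fuel_taking_fuel_mass_into_account required_fuel_taking_fuel_mass_into_account
  simpa using pvFuelLoopA_sum mass []
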